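-- pv_equiv track=rewrite | github.com/Maharaja-Sawai-Man-Singh-Vidyalaya/Mirage-Techfest | src/hyena.py | get_cog_aliases
-- ===== SOURCE A (Python) =====
-- def get_cog_aliases(term: str):
--     aliases = {
--         ("moderation", "mod"): "moderation",
--         ("handlers", "core", "core-handlers"): "core-handler",
--         ("timeout", "mute", "to"): "timeout",
--         ("action-logs", "actions", "alogs"): "action-logs",
--         ("warns", "warn", "warnings"): "warns",
--         ("file-system", "files", "filesys", "file"): "file-system",
--         ("afk",): "afk",
--         ("fun", "fun-commands"): "fun",
--         ("images", "image", "gen", "image-gen", "img", "img-gen"): "image-gen",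
--         ("utils", "utilities", "util"): "utilities",
--     }
--
--     for alias, cog in aliases.items():
--         if term.lower() in alias:
--             return cog
--     return term
-- ===== SOURCE B (Python) =====
-- # Flat reverse lookup table: each individual alias maps directly to its cog name,
-- # so resolution is a single dict lookup with the original term as fallback.
-- _ALIAS_TO_COG = {
--     "moderation": "moderation",
--     "mod": "moderation",
--     "handlers": "core-handler",
--     "core": "core-handler",
--     "core-handlers": "core-handler",
--     "timeout": "timeout",
--     "mute": "timeout",
--     "to": "timeout",
--     "action-logs": "action-logs",
--     "actions": "action-logs",
--     "alogs": "action-logs",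
--     "warns": "warns",
--     "warn": "warns",
--     "warnings": "warns",
--     "file-system": "file-system",
--     "files": "file-system",
--     "filesys": "file-system",
--     "file": "file-system",
--     "afk": "afk",
--     "fun": "fun",
--     "fun-commands": "fun",
--     "images": "image-gen",
--     "image": "image-gen",
--     "gen": "image-gen",
--     "image-gen": "image-gen",
--     "img": "image-gen",
--     "img-gen": "image-gen",
--     "utils": "utilities",
--     "utilities": "utilities",
--     "util": "utilities",
-- }
--
--
-- def get_cog_aliases(term: str):
--     return _ALIAS_TO_COG.get(term.lower(), term)
-- ===== Notes on version B (the rewrite author's own statement) =====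
-- stated objective: simpler
-- what changed: Replaced A's loop over tuple-keyed groups with membership tests by a hand-written flat reverse dictionary (each individual alias -> cog) and a single dict.get with the original term as fallback.
import Mathlib
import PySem

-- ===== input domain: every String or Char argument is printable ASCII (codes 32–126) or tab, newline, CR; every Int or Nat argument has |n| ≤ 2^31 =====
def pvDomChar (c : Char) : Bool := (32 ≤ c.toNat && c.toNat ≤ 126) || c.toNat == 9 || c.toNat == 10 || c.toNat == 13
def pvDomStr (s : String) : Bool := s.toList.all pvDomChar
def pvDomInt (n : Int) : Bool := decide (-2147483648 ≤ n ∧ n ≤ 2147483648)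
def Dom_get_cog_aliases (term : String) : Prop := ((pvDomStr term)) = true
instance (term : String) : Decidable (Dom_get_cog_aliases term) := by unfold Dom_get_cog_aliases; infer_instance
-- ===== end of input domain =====

-- B replaces A's scan over alias groups by a hand-written flat reverse dictionary and one lookup (simpler).

-- ===== PORT A =====
-- the dict literal of A, as an association list of (alias tuple, cog)
def pvGroupsA : List (List String × String) :=
  [ (["moderation", "mod"], "moderation"),
    (["handlers", "core", "core-handlers"], "core-handler"),
    (["timeout", "mute", "to"], "timeout"),
    (["action-logs", "actions", "alogs"], "action-logs"),
    (["warns", "warn", "warnings"], "warns"),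
    (["file-system", "files", "filesys", "file"], "file-system"),
    (["afk"], "afk"),
    (["fun", "fun-commands"], "fun"),
    (["images", "image", "gen", "image-gen", "img", "img-gen"], "image-gen"),
    (["utils", "utilities", "util"], "utilities") ]

-- the 'for alias, cog in aliases.items(): if term.lower() in alias: return cog' loop; falls through to 'return term'
def pvScanA (term : String) : List (List String × String) → String
  | [] => term
  | (al, cog) :: rest => if PySem.Str.lower term ∈ al then cog else pvScanA term rest

def get_cog_aliases (term : String) : String := pvScanA term pvGroupsA

-- ===== PORT B =====
-- Source B's flat literal dict _ALIAS_TO_COG (alias -> cog), key for key in source order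
def pvAliasToCog : PySem.Dict String String :=
  PySem.Dict.ofList
    [ ("moderation", "moderation"), ("mod", "moderation"),
      ("handlers", "core-handler"), ("core", "core-handler"), ("core-handlers", "core-handler"),
      ("timeout", "timeout"), ("mute", "timeout"), ("to", "timeout"),
      ("action-logs", "action-logs"), ("actions", "action-logs"), ("alogs", "action-logs"),
      ("warns", "warns"), ("warn", "warns"), ("warnings", "warns"),
      ("file-system", "file-system"), ("files", "file-system"), ("filesys", "file-system"), ("file", "file-system"),
      ("afk", "afk"),
      ("fun", "fun"), ("fun-commands", "fun"),
      ("images", "image-gen"), ("image", "image-gen"), ("gen", "image-gen"),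
      ("image-gen", "image-gen"), ("img", "image-gen"), ("img-gen", "image-gen"),
      ("utils", "utilities"), ("utilities", "utilities"), ("util", "utilities") ]

def get_cog_aliases_alt (term : String) : String :=
  pvAliasToCog.getD (PySem.Str.lower term) term

-- ===== PRECONDITION & SPEC =====
def Spec_get_cog_aliases (term : String) (out : String) : Prop := out = get_cog_aliases_alt term
instance (term : String) (out : String) : Decidable (Spec_get_cog_aliases term out) := by unfold Spec_get_cog_aliases; infer_instance

-- ===== CLAIM (what is proved, stated in full; the proofs are below) =====
def Claim_equal_get_cog_aliases : Prop := ∀ (term : String), Dom_get_cog_aliases term → Spec_get_cog_aliases term (get_cog_aliases term)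

-- ===== LEMMAS AND PROOFS =====

-- lookup in a flat block of one group equals membership in that group
theorem pv_lookup_group (lo c : String) (al : List String) (rest : List (String × String)) :
    List.lookup lo (al.map (fun a => (a, c)) ++ rest)
      = if lo ∈ al then some c else List.lookup lo rest := by
  induction al with
  | nil => simp
  | cons a al ih =>
      by_cases h : lo = a
      · simp [h]
      · have hb : (lo == a) = false := beq_eq_false_iff_ne.mpr h
        simp [List.lookup, hb, ih, h]

-- A's scan over groups equals first-match lookup in the flattened alias list
theorem pv_scan_eq_lookup (term : String) (groups : List (List String × String)) :
    pvScanA term groups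
      = (List.lookup (PySem.Str.lower term)
          (groups.flatMap (fun p => p.1.map (fun a => (a, p.2))))).getD term := by
  induction groups with
  | nil => simp [pvScanA]
  | cons g rest ih =>
      obtain ⟨al, cog⟩ := g
      rw [List.flatMap_cons]
      rw [pv_lookup_group (PySem.Str.lower term) cog al]
      by_cases h : PySem.Str.lower term ∈ al
      · simp [pvScanA, h]
      · simp [pvScanA, h, ih]

-- getD on a literal Dict is first-match lookup
theorem pv_getD_mk (l : List (String × String)) (lo dflt : String) :
    (PySem.Dict.mk l).getD lo dflt = (List.lookup lo l).getD dflt := by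
  induction l with
  | nil => simp [PySem.Dict.getD_eq_get?_getD, PySem.Dict.get?, List.lookup]
  | cons p rest ih =>
      obtain ⟨k, v⟩ := p
      rw [PySem.Dict.getD_eq_get?_getD, PySem.Dict.get?_mk_cons]
      by_cases h : k = lo
      · simp [List.lookup, h]
      · have h' : (lo == k) = false := beq_eq_false_iff_ne.mpr (fun e => h e.symm)
        simp [List.lookup, h', beq_iff_eq, h, ← PySem.Dict.getD_eq_get?_getD, ih]

-- Source B's flat literal dict has distinct keys and is exactly A's groups flattened in order
theorem pv_alias_to_cog_eq :
    pvAliasToCog = PySem.Dict.mk (pvGroupsA.flatMap (fun p => p.1.map (fun a => (a, p.2)))) := by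
  decide

-- ===== VERDICT (by name: the statement is the Claim_ definition above) =====
theorem get_cog_aliases_spec : Claim_equal_get_cog_aliases := by
  intro term _
  show get_cog_aliases term = get_cog_aliases_alt term
  rw [get_cog_aliases, get_cog_aliases_alt, pv_alias_to_cog_eq, pv_getD_mk,
    pv_scan_eq_lookup]
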